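-- pv_equiv track=rewrite | github.com/JamesRudd-Jones/windchime_length_calc | main.py | get_chime_ranges
-- ===== SOURCE A (Python) =====
-- def get_chime_ranges(note_list):
--     total_note_list = []
--     note_list_rhs = []
--     increment = 0
--     while True:
--         new_note_list = [(i[:-1] + str(int(i[-1]) + increment)) for i in note_list]
--         total_note_list.append(new_note_list)
--         increment += 1
--         if int(new_note_list[-1][-1]) >= 9:
--             increment = 1
--             break
--     while True:
--         new_note_list = [(i[:-1] + str(int(i[-1]) - increment)) for i in note_list]
--         note_list_rhs.append(new_note_list)
--         increment += 1
--         if int(new_note_list[0][-1]) <= 1: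
--             break
--
--     total_note_list = note_list_rhs[::-1] + total_note_list
--
--     return total_note_list
-- ===== SOURCE B (Python) =====
-- def get_chime_ranges(note_list):
--     up = 9 - int(note_list[-1][-1])
--     down = max(1, int(note_list[0][-1]) - 1)
--     return [[i[:-1] + str(int(i[-1]) + inc) for i in note_list]
--             for inc in range(-down, up + 1)]
-- ===== Notes on version B (the rewrite author's own statement) =====
-- stated objective: simpler
-- what changed: Replaces A's two while-True loops with carried increment state and break conditions by computing the two octave bounds up front (up = 9 - last digit of the last note, down = max(1, first digit of the first note - 1)) and building the whole result with a single comprehension over range(-down, up+1).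
-- outside the precondition, e.g. on get_chime_ranges([]): A raises IndexError, B raises IndexError
import Mathlib
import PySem

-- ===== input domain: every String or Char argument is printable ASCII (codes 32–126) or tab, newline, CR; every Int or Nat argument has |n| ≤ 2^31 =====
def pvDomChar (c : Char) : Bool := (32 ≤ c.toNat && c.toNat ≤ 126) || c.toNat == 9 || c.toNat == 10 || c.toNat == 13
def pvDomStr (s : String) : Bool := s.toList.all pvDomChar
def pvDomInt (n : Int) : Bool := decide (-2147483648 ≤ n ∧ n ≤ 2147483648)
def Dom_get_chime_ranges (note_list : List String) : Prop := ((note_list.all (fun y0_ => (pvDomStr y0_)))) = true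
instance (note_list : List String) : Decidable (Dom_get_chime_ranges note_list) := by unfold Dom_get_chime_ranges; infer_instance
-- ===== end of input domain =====

-- B replaces A's two while-True loops (carried increment, break conditions) by computing the two
-- octave bounds up front and mapping one shift comprehension over a single range — same values,
-- same order, no speed claim. Return-value equivalence only (neither program mutates its argument).

-- ===== PORT A =====
-- `int(i[-1])` for a note string `i`; the final `.getD 0` is junk reached only where Python raises
-- (empty note / non-digit last char), i.e. outside `Pre_get_chime_ranges`.
def pvNoteValA (i : String) : Int :=
  ((PySem.List.pyGet? i.toList (-1)).bind (fun c => PySem.Int.ofChars? [c])).getD 0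

-- `i[:-1] + str(int(i[-1]) + increment)` — slicing and concatenation ported on `List Char`
-- (PySem.Chars; exact), rebuilt into a `String` with `String.ofList`.
def pvShiftA (inc : Int) (i : String) : String :=
  String.ofList (PySem.Chars.slice i.toList none (some (-1)) ++ PySem.Int.toChars (pvNoteValA i + inc))

-- `i[:-1] + str(int(i[-1]) - increment)` (the second loop's comprehension body).
def pvShiftDownA (inc : Int) (i : String) : String :=
  String.ofList (PySem.Chars.slice i.toList none (some (-1)) ++ PySem.Int.toChars (pvNoteValA i - inc))

-- `int(l[idx][-1])`; the `.getD 0` is junk reached only where Python raises (outside `Pre_`).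
def pvCondValA (l : List String) (idx : Int) : Int :=
  (((PySem.List.pyGet? l idx).bind (fun s => PySem.List.pyGet? s.toList (-1))).bind
      (fun c => PySem.Int.ofChars? [c])).getD 0

-- first `while True` loop: append the shifted list, stop when `int(new[-1][-1]) >= 9`.
-- The `Nat` fuel only makes the recursion total: under `Pre_` the loop runs at most 10 times
-- (proved below via `pv_loopUp_eq`), and outside `Pre_` Python raises inside the loop body.
def pvLoopUpA (note_list : List String) : Nat → Int → List (List String) → List (List String)
  | 0, _, acc => acc
  | fuel + 1, inc, acc =>
      if 9 ≤ pvCondValA (note_list.map (pvShiftA inc)) (-1) then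
        acc ++ [note_list.map (pvShiftA inc)]
      else
        pvLoopUpA note_list fuel (inc + 1) (acc ++ [note_list.map (pvShiftA inc)])

-- second `while True` loop: append the down-shifted list, stop when `int(new[0][-1]) <= 1`.
def pvLoopDownA (note_list : List String) : Nat → Int → List (List String) → List (List String)
  | 0, _, acc => acc
  | fuel + 1, inc, acc =>
      if pvCondValA (note_list.map (pvShiftDownA inc)) 0 ≤ 1 then
        acc ++ [note_list.map (pvShiftDownA inc)]
      else
        pvLoopDownA note_list fuel (inc + 1) (acc ++ [note_list.map (pvShiftDownA inc)])

-- `note_list_rhs[::-1] + total_note_list`; `[::-1]` is `List.reverse` (PySem.List.slice?_none_none_neg_one).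
def get_chime_ranges (note_list : List String) : List (List String) :=
  (pvLoopDownA note_list 32 1 []).reverse ++ pvLoopUpA note_list 32 0 []

-- ===== PORT B =====
-- `int(note_list[idx][-1])`; `.getD 0` junk only where Python raises (outside `Pre_`).
def pvDigitB (l : List String) (idx : Int) : Int :=
  (((PySem.List.pyGet? l idx).bind (fun s => PySem.List.pyGet? s.toList (-1))).bind
      (fun c => PySem.Int.ofChars? [c])).getD 0

-- `i[:-1] + str(int(i[-1]) + inc)` (B's comprehension body), on `List Char` as in port A.
def pvShiftB (inc : Int) (i : String) : String :=
  String.ofList (PySem.Chars.slice i.toList none (some (-1)) ++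
    PySem.Int.toChars (((PySem.List.pyGet? i.toList (-1)).bind (fun c => PySem.Int.ofChars? [c])).getD 0 + inc))

def get_chime_ranges_alt (note_list : List String) : List (List String) :=
  let up := 9 - pvDigitB note_list (-1)
  let down := max 1 (pvDigitB note_list 0 - 1)
  (PySem.List.pyRange (-down) (up + 1) 1).map (fun inc => note_list.map (pvShiftB inc))

-- ===== PRECONDITION & SPEC =====
def pvDigitChars : List Char := ['0','1','2','3','4','5','6','7','8','9']

-- Exactly where A returns: on `[]` A hits IndexError (`new_note_list[-1]`), on an empty note
-- IndexError (`i[-1]`), and on a note whose last character is not an ASCII digit ValueError (`int`).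
def Pre_get_chime_ranges (note_list : List String) : Prop :=
  note_list ≠ [] ∧ ∀ s ∈ note_list, s.toList ≠ [] ∧ s.toList.getLast?.getD ' ' ∈ pvDigitChars

instance (note_list : List String) : Decidable (Pre_get_chime_ranges note_list) := by
  unfold Pre_get_chime_ranges; infer_instance

def pvWitness_get_chime_ranges : List String := (["A4"])

def Spec_get_chime_ranges (note_list : List String) (out : List (List String)) : Prop := out = get_chime_ranges_alt note_list
instance (note_list : List String) (out : List (List String)) : Decidable (Spec_get_chime_ranges note_list out) := by unfold Spec_get_chime_ranges; infer_instance

-- ===== CLAIM (what is proved, stated in full; the proofs are below) =====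
def Claim_equal_get_chime_ranges : Prop := ∀ (note_list : List String), Dom_get_chime_ranges note_list → Pre_get_chime_ranges note_list → Spec_get_chime_ranges note_list (get_chime_ranges note_list)

-- ===== LEMMAS AND PROOFS =====

lemma pv_digit_val (c : Char) (hc : c ∈ pvDigitChars) :
    0 ≤ (PySem.Int.ofChars? [c]).getD 0 ∧ (PySem.Int.ofChars? [c]).getD 0 ≤ 9 := by
  fin_cases hc <;> decide

-- last character of `pre ++ str(v)` parsed back, for the values the loops can reach
lemma pv_lastChar_toChars (v : Int) (h1 : -1 ≤ v) (h2 : v ≤ 9) (pre : List Char) :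
    (((pre ++ PySem.Int.toChars v).getLast?).bind (fun c => PySem.Int.ofChars? [c])).getD 0
      = if v < 0 then 1 else v := by
  interval_cases v <;> rw [List.getLast?_append_of_ne_nil _ (by decide)] <;> decide

lemma pv_noteVal_bounds (s : String) (h1 : s.toList ≠ [])
    (h2 : s.toList.getLast?.getD ' ' ∈ pvDigitChars) :
    0 ≤ pvNoteValA s ∧ pvNoteValA s ≤ 9 := by
  obtain ⟨c, hc⟩ := Option.isSome_iff_exists.mp (List.getLast?_isSome.mpr h1)
  rw [hc] at h2
  simpa [pvNoteValA, PySem.List.pyGet?_neg_one, hc] using pv_digit_val c h2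

lemma pv_condValA_neg_one (l : List String) (hl : l ≠ []) :
    pvCondValA l (-1) = pvNoteValA (l.getLast hl) := by
  simp [pvCondValA, pvNoteValA, PySem.List.pyGet?_neg_one, List.getLast?_eq_some_getLast hl]

lemma pv_condValA_zero (l : List String) (hl : l ≠ []) :
    pvCondValA l 0 = pvNoteValA (l.head hl) := by
  have h0 : l[0]? = some (l.head hl) := by
    rw [← List.head?_eq_getElem?, List.head?_eq_some_head]
  simp [pvCondValA, pvNoteValA, PySem.List.pyGet?_zero, h0]

lemma pvShiftB_eq : pvShiftB = pvShiftA := rfl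

lemma pvShiftDownA_eq (j : Int) : pvShiftDownA j = pvShiftA (-j) := by
  funext i; simp [pvShiftDownA, pvShiftA, sub_eq_add_neg]

lemma pvDigitB_eq : pvDigitB = pvCondValA := rfl

-- the loop's break test, read off the freshly built list (upward shift)
lemma pv_cond_up (l : List String) (hl : l ≠ []) (inc : Int)
    (hv1 : -1 ≤ pvNoteValA (l.getLast hl) + inc) (hv2 : pvNoteValA (l.getLast hl) + inc ≤ 9) :
    pvCondValA (l.map (pvShiftA inc)) (-1)
      = if pvNoteValA (l.getLast hl) + inc < 0 then 1 else pvNoteValA (l.getLast hl) + inc := by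
  rw [pvCondValA, PySem.List.pyGet?_neg_one, List.getLast?_map, List.getLast?_eq_some_getLast hl]
  simp only [Option.map_some, Option.bind_some, pvShiftA, String.toList_ofList,
    PySem.List.pyGet?_neg_one]
  exact pv_lastChar_toChars _ hv1 hv2 _

-- the break test of the second loop (downward shift, read at index 0)
lemma pv_cond_down (l : List String) (hl : l ≠ []) (inc : Int)
    (hv1 : -1 ≤ pvNoteValA (l.head hl) - inc) (hv2 : pvNoteValA (l.head hl) - inc ≤ 9) :
    pvCondValA (l.map (pvShiftDownA inc)) 0
      = if pvNoteValA (l.head hl) - inc < 0 then 1 else pvNoteValA (l.head hl) - inc := by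
  have h0 : (l.map (pvShiftDownA inc))[0]? = some (pvShiftDownA inc (l.head hl)) := by
    rw [← List.head?_eq_getElem?, List.head?_map, List.head?_eq_some_head hl]; rfl
  rw [pvCondValA, PySem.List.pyGet?_zero, h0]
  simp only [Option.bind_some, pvShiftDownA, String.toList_ofList,
    PySem.List.pyGet?_neg_one]
  exact pv_lastChar_toChars _ hv1 hv2 _

lemma pv_loopUp_eq (note_list : List String) (hl : note_list ≠ [])
    (h0 : 0 ≤ pvNoteValA (note_list.getLast hl)) (h9 : pvNoteValA (note_list.getLast hl) ≤ 9) :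
    ∀ (f : Nat) (inc : Int) (acc : List (List String)), 0 ≤ inc →
      pvNoteValA (note_list.getLast hl) + inc ≤ 9 →
      (9 - pvNoteValA (note_list.getLast hl) - inc).toNat < f →
      pvLoopUpA note_list f inc acc
        = acc ++ (PySem.List.pyRange inc (9 - pvNoteValA (note_list.getLast hl) + 1) 1).map
            (fun j => note_list.map (pvShiftA j)) := by
  intro f
  induction f with
  | zero => intro inc acc _ _ hf; omega
  | succ f ih =>
      intro inc acc hinc hle hf
      rw [pvLoopUpA, pv_cond_up note_list hl inc (by omega) hle,
        if_neg (show ¬(pvNoteValA (note_list.getLast hl) + inc < 0) by omega)]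
      by_cases hc : 9 ≤ pvNoteValA (note_list.getLast hl) + inc
      · rw [if_pos hc]
        have heq : inc = 9 - pvNoteValA (note_list.getLast hl) := by omega
        subst heq
        rw [PySem.List.pyRange_one_singleton]
        simp
      · rw [if_neg hc, ih (inc + 1) _ (by omega) (by omega) (by omega),
          PySem.List.pyRange_one_cons (a := inc)
            (b := 9 - pvNoteValA (note_list.getLast hl) + 1) (by omega)]
        simp

lemma pv_loopDown_eq (note_list : List String) (hl : note_list ≠ [])
    (h0 : 0 ≤ pvNoteValA (note_list.head hl)) (h9 : pvNoteValA (note_list.head hl) ≤ 9) :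
    ∀ (f : Nat) (inc : Int) (acc : List (List String)), 1 ≤ inc →
      inc ≤ max 1 (pvNoteValA (note_list.head hl) - 1) →
      (max 1 (pvNoteValA (note_list.head hl) - 1) - inc).toNat < f →
      pvLoopDownA note_list f inc acc
        = acc ++ (PySem.List.pyRange inc (max 1 (pvNoteValA (note_list.head hl) - 1) + 1) 1).map
            (fun j => note_list.map (pvShiftDownA j)) := by
  intro f
  induction f with
  | zero => intro inc acc _ _ hf; omega
  | succ f ih =>
      intro inc acc hinc hle hf
      rw [pvLoopDownA, pv_cond_down note_list hl inc (by omega) (by omega)]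
      by_cases hc : inc = max 1 (pvNoteValA (note_list.head hl) - 1)
      · rw [if_pos (by subst hc; split_ifs <;> omega)]
        subst hc
        rw [PySem.List.pyRange_one_singleton]
        simp
      · rw [if_neg (by split_ifs <;> omega),
          ih (inc + 1) _ (by omega) (by omega) (by omega),
          PySem.List.pyRange_one_cons (a := inc)
            (b := max 1 (pvNoteValA (note_list.head hl) - 1) + 1) (by omega)]
        simp

-- reversing the down-run turns it into the negative half of B's single range
lemma pv_rev_map_neg {α : Type} (g : Int → α) (D : Int) (hD : 0 ≤ D) :
    ((PySem.List.pyRange 1 (D + 1) 1).map (fun j => g (-j))).reverse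
      = (PySem.List.pyRange (-D) 0 1).map g := by
  apply List.ext_getElem
  · simp only [List.length_reverse, List.length_map, PySem.List.length_pyRange_one]
    omega
  · intro i h1 h2
    simp only [List.length_reverse, List.length_map, PySem.List.length_pyRange_one] at h1 h2
    simp only [List.getElem_reverse, List.getElem_map, List.length_map,
      PySem.List.length_pyRange_one, PySem.List.getElem_pyRange_one]
    congr 1
    omega

theorem get_chime_ranges_spec : Claim_equal_get_chime_ranges := by
  intro note_list _ hpre
  obtain ⟨hl, hall⟩ := hpre
  obtain ⟨hl9, hl0⟩ := pv_noteVal_bounds (note_list.getLast hl)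
    (hall _ (List.getLast_mem hl)).1 (hall _ (List.getLast_mem hl)).2
  obtain ⟨hh9, hh0⟩ := pv_noteVal_bounds (note_list.head hl)
    (hall _ (List.head_mem hl)).1 (hall _ (List.head_mem hl)).2
  unfold Spec_get_chime_ranges get_chime_ranges get_chime_ranges_alt
  rw [pvDigitB_eq, pvShiftB_eq, pv_condValA_neg_one note_list hl, pv_condValA_zero note_list hl,
    pv_loopUp_eq note_list hl hl9 hl0 32 0 [] le_rfl (by omega) (by omega),
    pv_loopDown_eq note_list hl hh9 hh0 32 1 [] le_rfl (by omega) (by omega)]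
  simp only [List.nil_append]
  rw [PySem.List.pyRange_one_append (-(max 1 (pvNoteValA (note_list.head hl) - 1))) 0
      (9 - pvNoteValA (note_list.getLast hl) + 1) (by omega) (by omega), List.map_append]
  congr 1
  simp only [pvShiftDownA_eq]
  exact pv_rev_map_neg (fun j => note_list.map (pvShiftA j)) _ (by omega)
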